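-- pv_equiv track=rewrite | github.com/zetlen/console-cowboy | console_cowboy/utils/fonts.py | extract_weight_from_name
-- ===== SOURCE A (Python) =====
-- def extract_weight_from_name(font_name: str) -> tuple[str, str | None]:
--     """
--     Extract weight/style suffix from a font name.
--
--     Works with both PostScript and friendly names:
--     - 'JetBrainsMono-Bold' -> ('JetBrainsMono', 'Bold')
--     - 'JetBrains Mono Bold' -> ('JetBrains Mono', 'Bold')
--     - 'M+CodeLat60NFP-Reg' -> ('M+CodeLat60NFP', 'Reg')
--     - 'Fira Code' -> ('Fira Code', None)
--
--     Args:
--         font_name: Font name potentially containing weight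
--
--     Returns:
--         Tuple of (base_name, weight) where weight may be None
--     """
--     if not font_name:
--         return (font_name, None)
--
--     # Common weight suffixes in order of specificity
--     # Include both full and abbreviated forms
--     weights = [
--         "ExtraBold",
--         "SemiBold",
--         "UltraBold",
--         "DemiBold",
--         "ExtraLight",
--         "UltraLight",
--         "BoldItalic",
--         "Bold",
--         "Light",
--         "Medium",
--         "Regular",
--         "Thin",
--         "Black",
--         "Heavy",
--         "Italic",
--         "Oblique",
--         "Retina",
--         "Book",
--         # Abbreviated forms
--         "Reg",
--         "Med",
--         "Bld",
--         "Lt",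
--         "It",
--         "Obl",
--     ]
--
--     # Check PostScript format (with dash)
--     for weight in weights:
--         if font_name.endswith(f"-{weight}"):
--             return (font_name[: -len(weight) - 1], weight)
--
--     # Check friendly format (with space)
--     for weight in weights:
--         if font_name.endswith(f" {weight}"):
--             return (font_name[: -len(weight) - 1], weight)
--
--     # Check no-separator format
--     for weight in weights:
--         if font_name.endswith(weight) and len(font_name) > len(weight):
--             # Make sure we're not matching part of the font name
--             base = font_name[: -len(weight)]
--             if base and (base[-1].islower() or base[-1] == "-"):
--                 return (base.rstrip("-"), weight)
--
--     return (font_name, None)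
-- ===== SOURCE B (Python) =====
-- WEIGHTS = [
--     "ExtraBold", "SemiBold", "UltraBold", "DemiBold", "ExtraLight",
--     "UltraLight", "BoldItalic", "Bold", "Light", "Medium", "Regular",
--     "Thin", "Black", "Heavy", "Italic", "Oblique", "Retina", "Book",
--     "Reg", "Med", "Bld", "Lt", "It", "Obl",
-- ]
-- _WEIGHT_SET = set(WEIGHTS)
--
--
-- def extract_weight_from_name(font_name: str) -> tuple:
--     if not font_name:
--         return (font_name, None)
--
--     # Separator cases: one rpartition + set lookup replaces each endswith scan.
--     # (No weight contains '-' or ' ', so the suffix after the LAST separator is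
--     # the only candidate the ordered scan could ever match.)
--     for sep in ("-", " "):
--         base, found, suffix = font_name.rpartition(sep)
--         if found and suffix in _WEIGHT_SET:
--             return (base, suffix)
--
--     # No-separator case: order of WEIGHTS and the boundary check matter; keep
--     # the ordered loop.
--     for weight in WEIGHTS:
--         if font_name.endswith(weight) and len(font_name) > len(weight):
--             base = font_name[: -len(weight)]
--             if base and (base[-1].islower() or base[-1] == "-"):
--                 return (base.rstrip("-"), weight)
--
--     return (font_name, None)
-- ===== Notes on version B (the rewrite author's own statement) =====
-- stated objective: simpler
-- what changed: The two endswith-scan loops over the 24 weight strings are replaced by one rpartition at the last separator plus a set-membership test (no weight contains a separator, so the suffix after the last one is the only possible match); only the boundary-sensitive no-separator loop is kept.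
import Mathlib
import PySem

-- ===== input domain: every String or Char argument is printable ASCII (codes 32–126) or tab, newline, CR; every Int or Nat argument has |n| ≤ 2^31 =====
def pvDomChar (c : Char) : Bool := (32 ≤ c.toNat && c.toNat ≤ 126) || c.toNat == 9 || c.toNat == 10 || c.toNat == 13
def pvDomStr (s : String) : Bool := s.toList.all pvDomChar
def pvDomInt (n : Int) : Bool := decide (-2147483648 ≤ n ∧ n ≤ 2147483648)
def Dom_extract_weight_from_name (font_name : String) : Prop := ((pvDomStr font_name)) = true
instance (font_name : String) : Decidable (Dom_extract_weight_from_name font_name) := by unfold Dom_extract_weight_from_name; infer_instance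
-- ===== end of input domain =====

-- B replaces the two endswith-scan loops with one rpartition-at-last-separator plus a set lookup (simpler; the boundary-sensitive no-separator loop is kept).


-- ===== PORT A =====
-- the `weights` list literal of A (B uses the same list; B additionally builds a set from it)
def pvWeights : List (List Char) :=
  ["ExtraBold".toList, "SemiBold".toList, "UltraBold".toList, "DemiBold".toList,
   "ExtraLight".toList, "UltraLight".toList, "BoldItalic".toList, "Bold".toList,
   "Light".toList, "Medium".toList, "Regular".toList, "Thin".toList, "Black".toList,
   "Heavy".toList, "Italic".toList, "Oblique".toList, "Retina".toList, "Book".toList,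
   "Reg".toList, "Med".toList, "Bld".toList, "Lt".toList, "It".toList, "Obl".toList]

-- hand port of Python's base.rstrip("-") (drop trailing '-' characters; exact for this one-char strip set)
def pvRstripDash (cs : List Char) : List Char := (cs.reverse.dropWhile (fun c => c == '-')).reverse

-- A's two separator loops: `for weight in weights: if font_name.endswith(sep+weight): return (font_name[:-len(weight)-1], weight)`
-- (the dash loop and the space loop are this same loop with sep = '-' resp. ' ')
def pvSepLoopA (cs : List Char) (sep : Char) : List (List Char) → Option (List Char × List Char)
  | [] => none
  | w :: ws =>
    if PySem.Chars.endswith cs (sep :: w) then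
      some (PySem.List.slice cs none (some (-(w.length : Int) - 1)), w)
    else pvSepLoopA cs sep ws

-- A's third loop (B keeps this loop verbatim, so both ports call it):
-- `if font_name.endswith(weight) and len(font_name) > len(weight): base = font_name[:-len(weight)];
--  if base and (base[-1].islower() or base[-1] == "-"): return (base.rstrip("-"), weight)`
def pvNosepLoop (cs : List Char) : List (List Char) → Option (List Char × List Char)
  | [] => none
  | w :: ws =>
    if PySem.Chars.endswith cs w && decide (w.length < cs.length) then
      let base := PySem.List.slice cs none (some (-(w.length : Int)))
      match PySem.List.pyGet? base (-1) with     -- `base and base[-1]…`: index only when base is truthy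
      | some l => if PySem.Chars.islower l || l == '-' then some (pvRstripDash base, w)
                  else pvNosepLoop cs ws
      | none => pvNosepLoop cs ws
    else pvNosepLoop cs ws

def extract_weight_from_name (font_name : String) : String × Option String :=
  if font_name.toList = [] then (font_name, none)
  else
    match pvSepLoopA font_name.toList '-' pvWeights with
    | some (b, w) => (String.ofList b, some (String.ofList w))
    | none =>
      match pvSepLoopA font_name.toList ' ' pvWeights with
      | some (b, w) => (String.ofList b, some (String.ofList w))
      | none =>
        match pvNosepLoop font_name.toList pvWeights with
        | some (b, w) => (String.ofList b, some (String.ofList w))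
        | none => (font_name, none)

-- ===== PORT B =====
-- hand port of `base, found, suffix = s.rpartition(sep)` for a one-char sep, fused with B's `if found:`:
-- some (base, suffix) = split at the LAST occurrence of sep, none = sep not found (exact)
def pvRsplitLast (sep : Char) : List Char → Option (List Char × List Char)
  | [] => none
  | x :: xs =>
    match pvRsplitLast sep xs with
    | some (b, s) => some (x :: b, s)
    | none => if x == sep then some ([], xs) else none

-- B's weight set (Python: _WEIGHT_SET = set(WEIGHTS))
def pvWeightSet : List (List Char) := PySem.Set.ofList pvWeights

-- B's separator case: rpartition at sep, then one set-membership test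
def pvSepPassB (cs : List Char) (sep : Char) : Option (List Char × List Char) :=
  match pvRsplitLast sep cs with
  | some (b, s) => if pvWeightSet.contains s then some (b, s) else none
  | none => none

def extract_weight_from_name_alt (font_name : String) : String × Option String :=
  if font_name.toList = [] then (font_name, none)
  else
    match pvSepPassB font_name.toList '-' with
    | some (b, w) => (String.ofList b, some (String.ofList w))
    | none =>
      match pvSepPassB font_name.toList ' ' with
      | some (b, w) => (String.ofList b, some (String.ofList w))
      | none =>
        match pvNosepLoop font_name.toList pvWeights with
        | some (b, w) => (String.ofList b, some (String.ofList w))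
        | none => (font_name, none)

-- ===== PRECONDITION & SPEC =====
def Spec_extract_weight_from_name (font_name : String) (out : String × Option String) : Prop := out = extract_weight_from_name_alt font_name
instance (font_name : String) (out : String × Option String) : Decidable (Spec_extract_weight_from_name font_name out) := by unfold Spec_extract_weight_from_name; infer_instance

-- ===== CLAIM (what is proved, stated in full; the proofs are below) =====
def Claim_equal_extract_weight_from_name : Prop := ∀ (font_name : String), Dom_extract_weight_from_name font_name → Spec_extract_weight_from_name font_name (extract_weight_from_name font_name)

-- ===== LEMMAS AND PROOFS =====

theorem pvRsplitLast_none (sep : Char) (cs : List Char)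
    (h : pvRsplitLast sep cs = none) : sep ∉ cs := by
  induction cs with
  | nil => simp
  | cons x xs ih =>
    simp only [pvRsplitLast] at h
    cases hr : pvRsplitLast sep xs with
    | some p => rw [hr] at h; cases p; simp at h
    | none =>
      rw [hr] at h
      by_cases hx : x = sep
      · simp [hx] at h
      · simp only [List.mem_cons, not_or]
        exact ⟨fun h2 => hx h2.symm, ih hr⟩

theorem pvRsplitLast_some (sep : Char) (cs b s : List Char)
    (h : pvRsplitLast sep cs = some (b, s)) : cs = b ++ sep :: s ∧ sep ∉ s := by
  induction cs generalizing b s with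
  | nil => simp [pvRsplitLast] at h
  | cons x xs ih =>
    simp only [pvRsplitLast] at h
    cases hr : pvRsplitLast sep xs with
    | some bs =>
      obtain ⟨b', s'⟩ := bs
      rw [hr] at h
      simp only [Option.some.injEq, Prod.mk.injEq] at h
      obtain ⟨hb, hs⟩ := h
      obtain ⟨he, hn⟩ := ih b' s' hr
      subst hb hs he; simp
      exact hn
    | none =>
      rw [hr] at h
      by_cases hx : x = sep
      · simp [hx] at h
        obtain ⟨hb, hs⟩ := h
        subst hb hs hx
        exact ⟨rfl, pvRsplitLast_none x xs hr⟩
      · simp [hx] at h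

theorem pvRsplitLast_of_not_mem (sep : Char) (cs : List Char) (h : sep ∉ cs) :
    pvRsplitLast sep cs = none := by
  cases hr : pvRsplitLast sep cs with
  | none => rfl
  | some p =>
    obtain ⟨b, s⟩ := p
    obtain ⟨he, _⟩ := pvRsplitLast_some sep cs b s hr
    exact absurd (he ▸ (by simp : sep ∈ b ++ sep :: s)) h

theorem pvRsplitLast_append (sep : Char) (b s : List Char) (hs : sep ∉ s) :
    pvRsplitLast sep (b ++ sep :: s) = some (b, s) := by
  induction b with
  | nil =>
    simp only [List.nil_append, pvRsplitLast]
    rw [pvRsplitLast_of_not_mem sep s hs]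
    simp
  | cons x b' ih =>
    simp only [List.cons_append, pvRsplitLast, ih]

-- A's separator loop computes exactly B's rpartition-plus-membership pass,
-- provided no weight in the list contains the separator character.
theorem pvSepLoop_eq (cs : List Char) (sep : Char) (ws : List (List Char))
    (hc : ∀ w ∈ ws, sep ∉ w) :
    pvSepLoopA cs sep ws =
      (match pvRsplitLast sep cs with
       | some (b, s) => if ws.contains s then some (b, s) else none
       | none => none) := by
  induction ws with
  | nil =>
    cases hr : pvRsplitLast sep cs with
    | none => simp [pvSepLoopA]
    | some p => cases p; simp [pvSepLoopA]
  | cons w ws ih =>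
    have hw : sep ∉ w := hc w (by simp)
    have hws : ∀ v ∈ ws, sep ∉ v := fun v hv => hc v (by simp [hv])
    by_cases hend : PySem.Chars.endswith cs (sep :: w) = true
    · -- cs ends with sep :: w, and sep ∉ w: the last sep splits cs as (prefix, w)
      obtain ⟨b, hb⟩ : ∃ b, cs = b ++ sep :: w := by
        have := (PySem.Chars.endswith_iff cs (sep :: w)).mp hend
        obtain ⟨b, hb⟩ := this
        exact ⟨b, hb.symm⟩
      have hr : pvRsplitLast sep cs = some (b, w) := hb ▸ pvRsplitLast_append sep b w hw
      have hslice : PySem.List.slice cs none (some (-(w.length : Int) - 1)) = b := by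
        have hcast : (-(w.length : Int) - 1) = -((w.length + 1 : Nat) : Int) := by push_cast; ring
        rw [hcast, PySem.List.slice_to_neg_natCast cs (w.length + 1) (by omega)]
        rw [hb]
        have : (b ++ sep :: w).length - (w.length + 1) = b.length := by
          simp [List.length_append]
        rw [this, List.take_left']
        simp
      simp only [pvSepLoopA, hend, if_pos, hr]
      simp [hslice]
    · -- cs does not end with sep :: w: the rpartition suffix (if any) is not w
      simp only [pvSepLoopA, hend]
      rw [ih hws]
      cases hr : pvRsplitLast sep cs with
      | none => simp
      | some p =>
        obtain ⟨b, s⟩ := p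
        obtain ⟨he, hns⟩ := pvRsplitLast_some sep cs b s hr
        have hsw : s ≠ w := by
          intro hsw
          apply hend
          rw [PySem.Chars.endswith_iff]
          exact ⟨b, by rw [he, hsw]⟩
        simp [hsw]

theorem pvWeightSet_eq : pvWeightSet = pvWeights := by decide

-- ===== VERDICT (by name: the statement is the Claim_ definition above) =====
theorem extract_weight_from_name_spec : Claim_equal_extract_weight_from_name := by
  intro font_name _
  unfold Spec_extract_weight_from_name
  unfold extract_weight_from_name extract_weight_from_name_alt
  have hdash : ∀ w ∈ pvWeights, '-' ∉ w := by decide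
  have hspace : ∀ w ∈ pvWeights, ' ' ∉ w := by decide
  rw [pvSepLoop_eq font_name.toList '-' pvWeights hdash,
      pvSepLoop_eq font_name.toList ' ' pvWeights hspace]
  simp only [pvSepPassB, pvWeightSet_eq]
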